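-- pv_equiv track=rewrite | github.com/harneet2512/groundtruth | benchmarks/swebench/gt_tool.py | _best_role_for_method
-- ===== SOURCE A (Python) =====
-- def _role_confidence(role):
--     """Confidence based on role type: structural roles are HIGH, logic reads are MED."""
--     HIGH_ROLES = {'serializes_to_kwargs', 'compares_in_eq', 'stores_in_state', 'emits_to_output'}
--     MED_ROLES = {'passes_to_validator', 'reads_in_logic'}
--     if role in HIGH_ROLES:
--         return 'HIGH'
--     if role in MED_ROLES:
--         return 'MED'
--     return 'LOW'
--
-- def _best_role_for_method(minfo, attr):
--     """Pick the highest-confidence role for an attr in a method."""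
--     roles = minfo.get('attr_roles', {}).get(attr, [])
--     if not roles:
--         return None, 'LOW'
--     # Sort by confidence: HIGH first
--     best_role = None
--     best_conf = 'LOW'
--     priority = {'HIGH': 0, 'MED': 1, 'LOW': 2}
--     for role in roles:
--         conf = _role_confidence(role)
--         if priority.get(conf, 3) < priority.get(best_conf, 3):
--             best_conf = conf
--             best_role = role
--     if best_role is None:
--         best_role = roles[0]
--     return best_role, best_conf
-- ===== SOURCE B (Python) =====
-- def _role_confidence(role):
--     """Confidence based on role type: structural roles are HIGH, logic reads are MED."""
--     HIGH_ROLES = {'serializes_to_kwargs', 'compares_in_eq', 'stores_in_state', 'emits_to_output'}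
--     MED_ROLES = {'passes_to_validator', 'reads_in_logic'}
--     if role in HIGH_ROLES:
--         return 'HIGH'
--     if role in MED_ROLES:
--         return 'MED'
--     return 'LOW'
--
-- def _best_role_for_method(minfo, attr):
--     """Pick the highest-confidence role for an attr in a method."""
--     roles = minfo.get('attr_roles', {}).get(attr, [])
--     if not roles:
--         return None, 'LOW'
--     for tier in ('HIGH', 'MED'):
--         for role in roles:
--             if _role_confidence(role) == tier:
--                 return role, tier
--     return roles[0], 'LOW'
-- ===== Notes on version B (the rewrite author's own statement) =====
-- stated objective: simpler
-- what changed: Replaced the single priority-dict tracking pass (best_role/best_conf accumulator with a numeric priority table and a None fallback patch) by an outer loop over confidence tiers in priority order with an inner first-match scan and an early return; no priority dict and no accumulator state.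
import Mathlib
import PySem

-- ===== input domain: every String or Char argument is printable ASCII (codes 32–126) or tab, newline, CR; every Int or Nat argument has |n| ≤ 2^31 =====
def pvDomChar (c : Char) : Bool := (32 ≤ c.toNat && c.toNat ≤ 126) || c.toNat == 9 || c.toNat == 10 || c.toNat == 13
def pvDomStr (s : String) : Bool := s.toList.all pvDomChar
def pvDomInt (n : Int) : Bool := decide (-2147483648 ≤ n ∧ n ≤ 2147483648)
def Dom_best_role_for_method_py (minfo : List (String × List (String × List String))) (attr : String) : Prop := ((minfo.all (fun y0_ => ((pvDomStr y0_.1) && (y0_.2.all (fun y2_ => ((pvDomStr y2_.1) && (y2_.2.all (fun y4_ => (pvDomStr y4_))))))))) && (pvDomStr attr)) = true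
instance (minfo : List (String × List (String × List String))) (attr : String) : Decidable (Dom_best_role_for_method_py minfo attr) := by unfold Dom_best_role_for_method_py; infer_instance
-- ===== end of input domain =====

-- ===== PORT A =====
-- B replaces A's single priority-tracking pass by a tier-priority outer loop with a
-- first-match inner scan (simpler: no priority dict, no accumulator state); same results.

-- shared helper: Python _role_confidence (identical in Source A and Source B)
def pvRoleConf (role : String) : String :=
  if role ∈ ["serializes_to_kwargs", "compares_in_eq", "stores_in_state", "emits_to_output"] then "HIGH"
  else if role ∈ ["passes_to_validator", "reads_in_logic"] then "MED"
  else "LOW"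

-- A's priority dict and loop body
def pvPriority : PySem.Dict String Int := PySem.Dict.mk [("HIGH", 0), ("MED", 1), ("LOW", 2)]

def pvStep (b : Option String × String) (role : String) : Option String × String :=
  let conf := pvRoleConf role
  if PySem.Dict.getD pvPriority conf 3 < PySem.Dict.getD pvPriority b.2 3 then (some role, conf)
  else b

def best_role_for_method_py (minfo : List (String × List (String × List String))) (attr : String) : Option String × String :=
  let roles := (PySem.Dict.mk ((PySem.Dict.mk minfo).getD "attr_roles" [])).getD attr []
  if roles = [] then (none, "LOW")
  else
    let st := roles.foldl pvStep (none, "LOW")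
    match st.1 with
    | some r => (some r, st.2)          -- best_role found by the loop
    | none => (some (roles.headD ""), st.2)  -- best_role = roles[0] (roles nonempty here)

-- ===== PORT B =====
def best_role_for_method_py_alt (minfo : List (String × List (String × List String))) (attr : String) : Option String × String :=
  let roles := (PySem.Dict.mk ((PySem.Dict.mk minfo).getD "attr_roles" [])).getD attr []
  match roles with
  | [] => (none, "LOW")
  | r0 :: _ =>
    match ["HIGH", "MED"].findSome? (fun tier =>
        (roles.find? (fun r => pvRoleConf r == tier)).map (fun r => (r, tier))) with
    | some (r, tier) => (some r, tier)
    | none => (some r0, "LOW")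

-- ===== PRECONDITION & SPEC =====
def Spec_best_role_for_method_py (minfo : List (String × List (String × List String))) (attr : String) (out : Option String × String) : Prop := out = best_role_for_method_py_alt minfo attr
instance (minfo : List (String × List (String × List String))) (attr : String) (out : Option String × String) : Decidable (Spec_best_role_for_method_py minfo attr out) := by unfold Spec_best_role_for_method_py; infer_instance

-- ===== CLAIM (what is proved, stated in full; the proofs are below) =====
def Claim_equal_best_role_for_method_py : Prop := ∀ (minfo : List (String × List (String × List String))) (attr : String), Dom_best_role_for_method_py minfo attr → Spec_best_role_for_method_py minfo attr (best_role_for_method_py minfo attr)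

-- ===== LEMMAS AND PROOFS =====

-- pvRoleConf only takes the three values
lemma pvRoleConf_cases (r : String) :
    pvRoleConf r = "HIGH" ∨ pvRoleConf r = "MED" ∨ pvRoleConf r = "LOW" := by
  unfold pvRoleConf; split_ifs <;> simp

-- evaluating A's loop body at each accumulator/confidence combination
lemma pvStep_high (r x : String) : pvStep (some r, "HIGH") x = (some r, "HIGH") := by
  rcases pvRoleConf_cases x with h | h | h <;>
    · simp only [pvStep, h]; rw [if_neg (by decide)]

lemma pvStep_med_high (m x : String) (hx : pvRoleConf x = "HIGH") :
    pvStep (some m, "MED") x = (some x, "HIGH") := by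
  simp only [pvStep, hx]; rw [if_pos (by decide)]

lemma pvStep_med_stay (m x : String) (hx : pvRoleConf x ≠ "HIGH") :
    pvStep (some m, "MED") x = (some m, "MED") := by
  rcases pvRoleConf_cases x with h | h | h
  · exact absurd h hx
  · simp only [pvStep, h]; rw [if_neg (by decide)]
  · simp only [pvStep, h]; rw [if_neg (by decide)]

lemma pvStep_low (x : String) :
    pvStep (none, "LOW") x =
      if pvRoleConf x = "HIGH" then (some x, "HIGH")
      else if pvRoleConf x = "MED" then (some x, "MED")
      else (none, "LOW") := by
  rcases pvRoleConf_cases x with h | h | h <;> simp only [pvStep, h]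
  · rw [if_pos (by decide)]; simp
  · rw [if_pos (by decide)]; simp
  · rw [if_neg (by decide)]; simp

-- once the accumulator is HIGH, A's loop never changes it
lemma foldl_high (r : String) (roles : List String) :
    roles.foldl pvStep (some r, "HIGH") = (some r, "HIGH") := by
  induction roles with
  | nil => rfl
  | cons x xs ih => rw [List.foldl_cons, pvStep_high, ih]

-- from a MED accumulator, A's loop picks the first HIGH role if any
lemma foldl_med (m : String) (roles : List String) :
    roles.foldl pvStep (some m, "MED") =
      match roles.find? (fun r => pvRoleConf r == "HIGH") with
      | some h => (some h, "HIGH")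
      | none => (some m, "MED") := by
  induction roles with
  | nil => rfl
  | cons x xs ih =>
    by_cases hx : pvRoleConf x = "HIGH"
    · rw [List.foldl_cons, pvStep_med_high m x hx, foldl_high,
        List.find?_cons_of_pos (by simp [hx])]
    · rw [List.foldl_cons, pvStep_med_stay m x hx, ih,
        List.find?_cons_of_neg (by simp [hx])]

-- characterisation of A's whole loop from the initial state
lemma foldl_low (roles : List String) :
    roles.foldl pvStep (none, "LOW") =
      match roles.find? (fun r => pvRoleConf r == "HIGH") with
      | some h => (some h, "HIGH")
      | none =>
        match roles.find? (fun r => pvRoleConf r == "MED") with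
        | some m => (some m, "MED")
        | none => (none, "LOW") := by
  induction roles with
  | nil => rfl
  | cons x xs ih =>
    rcases pvRoleConf_cases x with hx | hx | hx
    · rw [List.foldl_cons, pvStep_low, if_pos hx, foldl_high,
        List.find?_cons_of_pos (by simp [hx])]
    · rw [List.foldl_cons, pvStep_low, if_neg (by simp [hx]), if_pos hx, foldl_med,
        List.find?_cons_of_neg (by simp [hx]), List.find?_cons_of_pos (by simp [hx])]
    · rw [List.foldl_cons, pvStep_low, if_neg (by simp [hx]), if_neg (by simp [hx]), ih,
        List.find?_cons_of_neg (by simp [hx]), List.find?_cons_of_neg (by simp [hx])]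

-- ===== VERDICT (by name: the statement is the Claim_ definition above) =====
theorem best_role_for_method_py_spec : Claim_equal_best_role_for_method_py := by
  intro minfo attr _
  unfold Spec_best_role_for_method_py best_role_for_method_py best_role_for_method_py_alt
  cases hroles : (PySem.Dict.mk ((PySem.Dict.mk minfo).getD "attr_roles" [])).getD attr [] with
  | nil => simp
  | cons r0 rs =>
    simp only [if_neg (by simp : ¬ r0 :: rs = [])]
    rw [foldl_low]
    cases hH : (r0 :: rs).find? (fun r => pvRoleConf r == "HIGH") with
    | some h => simp [List.findSome?, hH]
    | none =>
      cases hM : (r0 :: rs).find? (fun r => pvRoleConf r == "MED") with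
      | some m => simp [List.findSome?, hH, hM]
      | none => simp [List.findSome?, hH, hM]
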